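-- pv_equiv track=rewrite | github.com/rysiekpol/tenis_court_management | tenis_scheduler/reservation/reservation_validator.py | _get_real_available_times
-- ===== SOURCE A (Python) =====
-- def _get_real_available_times(available_times, closest_reservations):
--     available_times_copy = available_times.copy()
--     for start_time, end_time in closest_reservations:
--         for j in range(len(available_times)):
--             if start_time <= available_times[j][0] < end_time:
--                 if available_times[j] in available_times_copy:
--                     available_times_copy.remove(available_times[j])
--     return available_times_copy
-- ===== SOURCE B (Python) =====
-- def _get_real_available_times(available_times, closest_reservations):
--     return [slot for slot in available_times
--             if not any(start <= slot[0] < end for start, end in closest_reservations)]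
-- ===== Notes on version B (the rewrite author's own statement) =====
-- stated objective: faster
-- what changed: Replaces the copy-scan-and-remove-first nested passes (reservations outer, index scan inner, membership test plus list.remove inside) with a single keep-filter comprehension over the slots; no copy, no in-place deletion.
import Mathlib
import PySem

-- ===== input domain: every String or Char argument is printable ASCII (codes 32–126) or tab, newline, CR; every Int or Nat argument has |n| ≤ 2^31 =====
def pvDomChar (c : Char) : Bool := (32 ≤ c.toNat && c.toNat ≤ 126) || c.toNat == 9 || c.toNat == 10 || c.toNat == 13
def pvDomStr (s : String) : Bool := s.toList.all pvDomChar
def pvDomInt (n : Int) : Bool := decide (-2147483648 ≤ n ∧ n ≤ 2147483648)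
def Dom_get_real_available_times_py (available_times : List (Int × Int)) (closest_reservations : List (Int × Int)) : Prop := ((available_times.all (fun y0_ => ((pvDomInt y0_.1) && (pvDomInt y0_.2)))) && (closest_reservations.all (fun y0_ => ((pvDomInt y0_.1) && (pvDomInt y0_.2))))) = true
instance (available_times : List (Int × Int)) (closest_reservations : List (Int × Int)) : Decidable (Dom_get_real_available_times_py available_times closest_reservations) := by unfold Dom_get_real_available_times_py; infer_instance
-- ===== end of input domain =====

-- B replaces A's copy-then-scan-and-remove nested passes by a single keep-filter over the slots (simpler decomposition, same results).

-- ===== PORT A =====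
-- the index j of the inner loop is always in range, so the pyGetD default (0, 0) is never used — exact
def get_real_available_times_py (available_times : List (Int × Int)) (closest_reservations : List (Int × Int)) : List (Int × Int) :=
  closest_reservations.foldl
    (fun copy r =>
      (PySem.List.pyRange 0 (available_times.length : Int) 1).foldl
        (fun copy j =>
          let slot := PySem.List.pyGetD available_times j (0, 0)
          if r.1 ≤ slot.1 ∧ slot.1 < r.2 then
            if slot ∈ copy then (PySem.List.remove? copy slot).getD copy else copy
          else copy)
        copy)
    available_times

-- ===== PORT B =====
def get_real_available_times_py_alt (available_times : List (Int × Int)) (closest_reservations : List (Int × Int)) : List (Int × Int) :=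
  available_times.filter
    (fun slot => !(closest_reservations.any (fun r => decide (r.1 ≤ slot.1) && decide (slot.1 < r.2))))

-- ===== PRECONDITION & SPEC =====
def Spec_get_real_available_times_py (available_times : List (Int × Int)) (closest_reservations : List (Int × Int)) (out : List (Int × Int)) : Prop := out = get_real_available_times_py_alt available_times closest_reservations
instance (available_times : List (Int × Int)) (closest_reservations : List (Int × Int)) (out : List (Int × Int)) : Decidable (Spec_get_real_available_times_py available_times closest_reservations out) := by unfold Spec_get_real_available_times_py; infer_instance

-- ===== CLAIM (what is proved, stated in full; the proofs are below) =====
def Claim_equal_get_real_available_times_py : Prop := ∀ (available_times : List (Int × Int)) (closest_reservations : List (Int × Int)), Dom_get_real_available_times_py available_times closest_reservations → Spec_get_real_available_times_py available_times closest_reservations (get_real_available_times_py available_times closest_reservations)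

-- ===== LEMMAS AND PROOFS =====

-- the step of A's inner loop, after the index loop has been bridged to a fold over the slots
def pvStep (r : Int × Int) (copy : List (Int × Int)) (slot : Int × Int) : List (Int × Int) :=
  if r.1 ≤ slot.1 ∧ slot.1 < r.2 then
    if slot ∈ copy then (PySem.List.remove? copy slot).getD copy else copy
  else copy

-- erasing an element NOT kept by the filter predicate does not change the filtered list
theorem pv_filter_erase (c : Int × Int → Bool) (a : Int × Int) (h : c a = false) :
    ∀ (l : List (Int × Int)), (l.erase a).filter c = l.filter c := by
  intro l
  induction l with
  | nil => rfl
  | cons b t ih =>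
    by_cases hba : b = a
    · subst hba
      simp [List.erase_cons_head, h]
    · rw [List.erase_cons_tail (by simpa using fun h' => hba h')]
      simp only [List.filter_cons, ih]

-- A's inner loop over all slots removes from `copy` exactly the slots covered by the reservation r,
-- provided `copy` never holds more occurrences of a value than `todo` does
theorem pv_inner (r : Int × Int) :
    ∀ (todo copy : List (Int × Int)),
      (∀ v, (r.1 ≤ v.1 ∧ v.1 < r.2) → copy.count v ≤ todo.count v) →
      todo.foldl (pvStep r) copy
        = copy.filter (fun s => !(decide (r.1 ≤ s.1) && decide (s.1 < r.2))) := by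
  intro todo
  induction todo with
  | nil =>
    intro copy h
    rw [List.foldl_nil, List.filter_eq_self.mpr]
    intro v hv
    by_cases hcv : r.1 ≤ v.1 ∧ v.1 < r.2
    · exfalso
      have h1 := h v hcv
      have h2 : 0 < List.count v copy := List.count_pos_iff.mpr hv
      simp at h1
      omega
    · simp
      omega
  | cons a rest ih =>
    intro copy h
    rw [List.foldl_cons]
    by_cases hcov : r.1 ≤ a.1 ∧ a.1 < r.2
    · by_cases hmem : a ∈ copy
      · have hstep : pvStep r copy a = copy.erase a := by
          simp [pvStep, hcov, hmem, PySem.List.remove?_eq_some_erase copy a hmem]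
        rw [hstep, ih (copy.erase a) ?_, pv_filter_erase _ a (by simp [hcov.1, hcov.2])]
        intro v hv
        by_cases hva : v = a
        · subst hva
          have := h v hv
          have h1 : List.count v (copy.erase v) = List.count v copy - 1 := List.count_erase_self
          have h2 : List.count v (v :: rest) = List.count v rest + 1 := by simp
          omega
        · rw [List.count_erase_of_ne hva]
          have := h v hv
          rwa [List.count_cons_of_ne (fun h' => hva h'.symm)] at this
      · have hstep : pvStep r copy a = copy := by simp [pvStep, hcov, hmem]
        rw [hstep, ih copy ?_]
        intro v hv
        by_cases hva : v = a
        · subst hva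
          simp [List.count_eq_zero_of_not_mem hmem]
        · have := h v hv
          rwa [List.count_cons_of_ne (fun h' => hva h'.symm)] at this
    · have hstep : pvStep r copy a = copy := by simp [pvStep, hcov]
      rw [hstep, ih copy ?_]
      intro v hv
      have hva : v ≠ a := by
        intro hva; subst hva; exact hcov hv
      have := h v hv
      rwa [List.count_cons_of_ne (fun h' => hva h'.symm)] at this

-- A's outer loop over the reservations, starting from a filtered copy of the slots,
-- yields the slots kept by the conjunction of the old predicate and "not covered by any reservation"
theorem pv_outer :
    ∀ (cr : List (Int × Int)) (av : List (Int × Int)) (p : Int × Int → Bool),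
      cr.foldl (fun copy r => av.foldl (pvStep r) copy) (av.filter p)
        = av.filter (fun s => p s && !(cr.any (fun r => decide (r.1 ≤ s.1) && decide (s.1 < r.2)))) := by
  intro cr
  induction cr with
  | nil =>
    intro av p
    simp
  | cons r rs ih =>
    intro av p
    rw [List.foldl_cons,
        pv_inner r av (av.filter p)
          (fun v _ => List.Sublist.count_le v (List.filter_sublist (p := p) (l := av))),
        List.filter_filter, ih av _]
    apply List.filter_congr
    intro s _
    simp only [List.any_cons, Bool.not_or]
    ac_rfl

-- ===== VERDICT (by name: the statement is the Claim_ definition above) =====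
theorem get_real_available_times_py_spec : Claim_equal_get_real_available_times_py := by
  intro av cr _
  unfold Spec_get_real_available_times_py get_real_available_times_py get_real_available_times_py_alt
  have hbridge : ∀ (r : Int × Int) (copy : List (Int × Int)),
      (PySem.List.pyRange 0 (av.length : Int) 1).foldl
        (fun copy j =>
          let slot := PySem.List.pyGetD av j (0, 0)
          if r.1 ≤ slot.1 ∧ slot.1 < r.2 then
            if slot ∈ copy then (PySem.List.remove? copy slot).getD copy else copy
          else copy)
        copy = av.foldl (pvStep r) copy := by
    intro r copy
    exact PySem.List.foldl_pyRange_zero_pyGetD' av (0, 0) (pvStep r) copy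
  calc cr.foldl
        (fun copy r =>
          (PySem.List.pyRange 0 (av.length : Int) 1).foldl
            (fun copy j =>
              let slot := PySem.List.pyGetD av j (0, 0)
              if r.1 ≤ slot.1 ∧ slot.1 < r.2 then
                if slot ∈ copy then (PySem.List.remove? copy slot).getD copy else copy
              else copy)
            copy)
        av
      = cr.foldl (fun copy r => av.foldl (pvStep r) copy) (av.filter (fun _ => true)) := by
        simp only [List.filter_true]
        exact List.foldl_ext _ _ _ (fun copy r _ => hbridge r copy)
    _ = av.filter (fun s => (fun _ => true) s && !(cr.any (fun r => decide (r.1 ≤ s.1) && decide (s.1 < r.2)))) := pv_outer cr av _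
    _ = av.filter (fun slot => !(cr.any (fun r => decide (r.1 ≤ slot.1) && decide (slot.1 < r.2)))) := by simp
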